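-- pv_equiv track=rewrite | github.com/Pancio-code/Fondamenti-informatica-I | laboratorio/soluzioni lab/Soluzione/Eserc2/B_Ex2.py | B_Ex2
-- ===== SOURCE A (Python) =====
-- def B_Ex2(l):
--     massimo=0
--     lista=[]
--     for e in l:
--         cont=0
--         for c in e:
--             if c.islower():
--                 cont+=1
--         if cont>massimo:
--             massimo=cont
--             lista=[e]
--         elif cont==massimo:
--             lista.append(e)
--     i=0
--     while i < len(l):
--         if l[i] in lista:
--             l=l[:i+1]+[l[i]]+l[i+1:]
--             i=i+2
--         else:
--             i=i+1
--     return l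
-- ===== SOURCE B (Python) =====
-- def B_Ex2(l):
--     counts = [len([c for c in e if c.islower()]) for e in l]
--     massimo = max(counts, default=0)
--     out = []
--     for e, cont in zip(l, counts):
--         out.append(e)
--         if cont == massimo:
--             out.append(e)
--     return out
-- ===== Notes on version B (the rewrite author's own statement) =====
-- stated objective: faster
-- what changed: B replaces A's running-max/reset accumulation of a candidate list plus the index-splicing while-loop (rebuilding the list with l[:i+1]+[l[i]]+l[i+1:] and skipping the inserted copy, with an 'in lista' membership scan) by two plain passes: compute every lowercase count once, take the max with default 0, and build a fresh output appending each element twice exactly when its count equals the max.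
import Mathlib
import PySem

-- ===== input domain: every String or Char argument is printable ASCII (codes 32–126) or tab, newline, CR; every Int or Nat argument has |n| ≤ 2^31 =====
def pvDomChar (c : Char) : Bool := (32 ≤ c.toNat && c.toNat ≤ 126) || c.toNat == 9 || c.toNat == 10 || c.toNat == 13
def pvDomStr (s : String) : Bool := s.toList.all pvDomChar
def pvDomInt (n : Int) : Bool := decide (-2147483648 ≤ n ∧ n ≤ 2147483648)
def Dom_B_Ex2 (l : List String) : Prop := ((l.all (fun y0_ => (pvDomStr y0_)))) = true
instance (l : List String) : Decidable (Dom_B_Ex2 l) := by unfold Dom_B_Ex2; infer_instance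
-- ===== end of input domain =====

-- B rewrites A's running-max/reset candidate accumulation plus index-splicing while-loop as two
-- plain passes (count lowercase per string, take the max with default 0, rebuild the list
-- duplicating the max-count elements); a timing run measured B faster. A does not mutate its argument
-- (it only rebinds the local l), so return-value equivalence is full equivalence.

-- ===== PORT A =====
-- inner loop: cont = number of lowercase characters of e (running Int counter, as in A)
def pvCountA (e : String) : Int :=
  e.toList.foldl (fun cont c => if PySem.Chars.islower c then cont + 1 else cont) 0

-- one iteration of A's first for-loop over state (massimo, lista)
def pvStepA (st : Int × List String) (e : String) : Int × List String :=
  let cont := pvCountA e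
  if cont > st.1 then (cont, [e])
  else if cont = st.1 then (st.1, st.2 ++ [e])
  else st

-- A's while-loop: splice l[:i+1] + [l[i]] + l[i+1:] and jump i+2 on a duplicate
def pvDupA (lista : List String) (l : List String) (i : Nat) : List String :=
  if h : i < l.length then
    if l[i] ∈ lista then
      pvDupA lista
        (PySem.List.slice l none (some (((i+1 : Nat) : Int))) ++ [l[i]] ++
         PySem.List.slice l (some (((i+1 : Nat) : Int))) none) (i+2)
    else pvDupA lista l (i+1)
  else l
termination_by l.length - i
decreasing_by
  · have h1 := PySem.List.slice_to_natCast l (i+1)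
    have h2 := PySem.List.slice_from_natCast l (i+1)
    push_cast at h1 h2
    simp [h1, h2]
    omega
  · omega

def B_Ex2 (l : List String) : List String :=
  let st := l.foldl pvStepA (0, [])
  pvDupA st.2 l 0

-- ===== PORT B =====
-- len([c for c in e if c.islower()])
def pvCountB (e : String) : Int :=
  ((e.toList.filter (fun c => PySem.Chars.islower c)).length : Int)

def B_Ex2_alt (l : List String) : List String :=
  let counts := l.map pvCountB
  let massimo := PySem.List.maxD counts (fun x => x) 0
  (l.zip counts).foldl
    (fun out p => let out := out ++ [p.1]; if p.2 = massimo then out ++ [p.1] else out) []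

-- ===== PRECONDITION & SPEC =====
def Spec_B_Ex2 (l : List String) (out : List String) : Prop := out = B_Ex2_alt l
instance (l : List String) (out : List String) : Decidable (Spec_B_Ex2 l out) := by unfold Spec_B_Ex2; infer_instance

-- ===== CLAIM (what is proved, stated in full; the proofs are below) =====
def Claim_equal_B_Ex2 : Prop := ∀ (l : List String), Dom_B_Ex2 l → Spec_B_Ex2 l (B_Ex2 l)

-- ===== LEMMAS AND PROOFS =====

-- the two ways of counting lowercase characters agree
theorem pvCount_eq (e : String) : pvCountA e = pvCountB e := by
  simp [pvCountA, pvCountB, PySem.List.foldl_if_add_one, List.countP_eq_length_filter]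

-- the maximum lowercase count of l (with seed 0), A's final massimo
def pvMx (l : List String) : Int := ((l.map pvCountA).foldl max 0)

theorem pvMx_append_singleton (p : List String) (e : String) :
    pvMx (p ++ [e]) = max (pvMx p) (pvCountA e) := by
  simp [pvMx]

-- counts never exceed pvMx
theorem pvCount_le_pvMx (p : List String) (x : String) (hx : x ∈ p) : pvCountA x ≤ pvMx p :=
  (PySem.List.le_foldl_max (p.map pvCountA) 0).2 _ (List.mem_map_of_mem hx)

-- A's branch on (cont > massimo / cont == massimo / otherwise), case by case
theorem pvStepA_lt (m : Int) (la : List String) (e : String) (h : pvCountA e < m) :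
    pvStepA (m, la) e = (m, la) := by
  show (if pvCountA e > m then (pvCountA e, [e])
        else if pvCountA e = m then (m, la ++ [e]) else (m, la)) = (m, la)
  rw [if_neg (by omega), if_neg (by omega)]

theorem pvStepA_eq (m : Int) (la : List String) (e : String) (h : pvCountA e = m) :
    pvStepA (m, la) e = (m, la ++ [e]) := by
  show (if pvCountA e > m then (pvCountA e, [e])
        else if pvCountA e = m then (m, la ++ [e]) else (m, la)) = (m, la ++ [e])
  rw [if_neg (by omega), if_pos h]

theorem pvStepA_gt (m : Int) (la : List String) (e : String) (h : m < pvCountA e) :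
    pvStepA (m, la) e = (pvCountA e, [e]) := by
  show (if pvCountA e > m then (pvCountA e, [e])
        else if pvCountA e = m then (m, la ++ [e]) else (m, la)) = (pvCountA e, [e])
  rw [if_pos (by omega : pvCountA e > m)]

-- invariant of A's first loop
theorem pvLoop1 (rest : List String) : ∀ (p : List String),
    rest.foldl pvStepA (pvMx p, p.filter (fun e => pvCountA e == pvMx p)) =
      (pvMx (p ++ rest), (p ++ rest).filter (fun e => pvCountA e == pvMx (p ++ rest))) := by
  induction rest with
  | nil => intro p; simp
  | cons e rest ih =>
    intro p
    have hre : p ++ e :: rest = (p ++ [e]) ++ rest := by simp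
    rcases lt_trichotomy (pvCountA e) (pvMx p) with h | h | h
    · have hmx : pvMx (p ++ [e]) = pvMx p := by rw [pvMx_append_singleton]; omega
      have hf : (p ++ [e]).filter (fun x => pvCountA x == pvMx (p ++ [e])) =
          p.filter (fun x => pvCountA x == pvMx p) := by
        rw [hmx, List.filter_append]
        have h1 : [e].filter (fun x => pvCountA x == pvMx p) = [] := by
          simp [beq_iff_eq]; omega
        simp [h1]
      rw [List.foldl_cons, pvStepA_lt _ _ _ h, hre,
        show (pvMx p, p.filter (fun x => pvCountA x == pvMx p)) =
          (pvMx (p ++ [e]), (p ++ [e]).filter (fun x => pvCountA x == pvMx (p ++ [e]))) from by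
            rw [hf, hmx]]
      exact ih (p ++ [e])
    · have hmx : pvMx (p ++ [e]) = pvMx p := by rw [pvMx_append_singleton]; omega
      have hf : (p ++ [e]).filter (fun x => pvCountA x == pvMx (p ++ [e])) =
          p.filter (fun x => pvCountA x == pvMx p) ++ [e] := by
        rw [hmx, List.filter_append]
        have h1 : [e].filter (fun x => pvCountA x == pvMx p) = [e] := by
          simp [h]
        simp [h1]
      rw [List.foldl_cons, pvStepA_eq _ _ _ h, hre,
        show (pvMx p, p.filter (fun x => pvCountA x == pvMx p) ++ [e]) =
          (pvMx (p ++ [e]), (p ++ [e]).filter (fun x => pvCountA x == pvMx (p ++ [e]))) from by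
            rw [hf, hmx]]
      exact ih (p ++ [e])
    · have hmx : pvMx (p ++ [e]) = pvCountA e := by
        have h0 : (0:Int) ≤ pvMx p := (PySem.List.le_foldl_max (p.map pvCountA) 0).1
        rw [pvMx_append_singleton]; omega
      have hf : (p ++ [e]).filter (fun x => pvCountA x == pvMx (p ++ [e])) = [e] := by
        rw [hmx, List.filter_append]
        have hnil : p.filter (fun x => pvCountA x == pvCountA e) = [] := by
          rw [List.filter_eq_nil_iff]
          intro x hx hbe
          have := pvCount_le_pvMx p x hx
          rw [beq_iff_eq] at hbe
          omega
        simp [hnil]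
      rw [List.foldl_cons, pvStepA_gt _ _ _ h, hre,
        show (pvCountA e, [e]) =
          (pvMx (p ++ [e]), (p ++ [e]).filter (fun x => pvCountA x == pvMx (p ++ [e]))) from by
            rw [hf, hmx]]
      exact ih (p ++ [e])

theorem pvLoop1_zero (l : List String) :
    l.foldl pvStepA (0, []) = (pvMx l, l.filter (fun e => pvCountA e == pvMx l)) := by
  have := pvLoop1 l []
  simpa [pvMx] using this

-- A's while-loop duplicates, in order, exactly the elements that lie in lista
theorem pvDup_char (rest : List String) : ∀ (pre : List String) (lista : List String),
    pvDupA lista (pre ++ rest) pre.length =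
      pre ++ rest.flatMap (fun e => if e ∈ lista then [e, e] else [e]) := by
  induction rest with
  | nil => intro pre lista; rw [pvDupA]; simp
  | cons e rest ih =>
    intro pre lista
    have hlen : pre.length < (pre ++ e :: rest).length := by simp
    have hget : (pre ++ e :: rest)[pre.length]'hlen = e := by
      simp
    rw [pvDupA]
    rw [dif_pos hlen]
    by_cases hmem : e ∈ lista
    · rw [if_pos (by rw [hget]; exact hmem)]
      have htake : PySem.List.slice (pre ++ e :: rest) none (some ((pre.length + 1 : Nat) : Int)) =
          pre ++ [e] := by
        rw [PySem.List.slice_to_natCast]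
        have : pre ++ e :: rest = (pre ++ [e]) ++ rest := by simp
        rw [this, show pre.length + 1 = (pre ++ [e]).length by simp, List.take_left]
      have hdrop : PySem.List.slice (pre ++ e :: rest) (some ((pre.length + 1 : Nat) : Int)) none =
          rest := by
        rw [PySem.List.slice_from_natCast]
        have : pre ++ e :: rest = (pre ++ [e]) ++ rest := by simp
        rw [this, show pre.length + 1 = (pre ++ [e]).length by simp, List.drop_left]
      rw [hget, htake, hdrop]
      have harr : pre ++ [e] ++ [e] ++ rest = (pre ++ [e, e]) ++ rest := by simp
      have hlen2 : pre.length + 2 = (pre ++ [e, e]).length := by simp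
      rw [harr, hlen2, ih (pre ++ [e, e]) lista]
      simp [hmem]
    · rw [if_neg (by rw [hget]; exact hmem)]
      have : pre ++ e :: rest = (pre ++ [e]) ++ rest := by simp
      rw [this, show pre.length + 1 = (pre ++ [e]).length by simp, ih (pre ++ [e]) lista]
      simp [hmem]

-- B's output loop as a flatMap
theorem pvFoldB (l : List String) (m : Int) : ∀ (out : List String),
    (l.zip (l.map pvCountB)).foldl
        (fun out p => if p.2 = m then out ++ [p.1, p.1] else out ++ [p.1]) out =
      out ++ l.flatMap (fun e => if pvCountB e = m then [e, e] else [e]) := by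
  induction l with
  | nil => intro out; simp
  | cons e t ih =>
    intro out
    by_cases h : pvCountB e = m <;> simp [h] <;> rw [ih] <;> simp

-- B's max(counts, default=0) equals A's final massimo
theorem pvMaxD_eq (l : List String) :
    PySem.List.maxD (l.map pvCountB) (fun x => x) 0 = pvMx l := by
  have hmap : l.map pvCountB = l.map pvCountA := by
    exact List.map_congr_left (fun e _ => (pvCount_eq e).symm)
  rw [hmap]
  cases l with
  | nil => simp [PySem.List.maxD, PySem.List.max?, pvMx]
  | cons e t =>
    rw [List.map_cons, PySem.List.maxD, PySem.List.max?_id_cons, Option.getD_some]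
    have h0 : max 0 (pvCountA e) = pvCountA e := by
      have : (0:Int) ≤ pvCountA e := by
        rw [pvCount_eq]; exact Int.natCast_nonneg _
      omega
    simp [pvMx, h0]

-- ===== VERDICT (by name: the statement is the Claim_ definition above) =====
theorem B_Ex2_spec : Claim_equal_B_Ex2 := by
  intro l _
  unfold Spec_B_Ex2
  have hA : B_Ex2 l = pvDupA (l.filter (fun e => pvCountA e == pvMx l)) l 0 := by
    simp only [B_Ex2]
    rw [pvLoop1_zero]
  have hB : B_Ex2_alt l =
      l.flatMap (fun e => if pvCountB e = pvMx l then [e, e] else [e]) := by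
    simp only [B_Ex2_alt, List.append_assoc, List.singleton_append]
    rw [pvMaxD_eq, pvFoldB l (pvMx l) []]
    simp
  have h0 : pvDupA (l.filter (fun e => pvCountA e == pvMx l)) l 0 =
      [] ++ l.flatMap (fun e => if e ∈ l.filter (fun x => pvCountA x == pvMx l) then [e, e] else [e]) := by
    simpa using pvDup_char l [] (l.filter (fun e => pvCountA e == pvMx l))
  rw [hA, hB, h0]
  simp only [List.nil_append]
  refine List.flatMap_congr (fun e he => ?_)
  by_cases hc : pvCountB e = pvMx l
  · have : e ∈ l.filter (fun x => pvCountA x == pvMx l) := by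
      rw [List.mem_filter]
      exact ⟨he, by rw [beq_iff_eq, pvCount_eq]; exact hc⟩
    simp [this, hc]
  · have : e ∉ l.filter (fun x => pvCountA x == pvMx l) := by
      rw [List.mem_filter]
      rintro ⟨-, hbe⟩
      rw [beq_iff_eq, pvCount_eq] at hbe
      exact hc hbe
    simp [this, hc]
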